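-- pv_equiv track=rewrite | github.com/pypi-data/pypi-mirror-398 | packages/gms-mcp/gms_mcp-0.1.7.dev1400.tar.gz/gms_mcp-0.1.7.dev1400/src/gms_helpers/maintenance/static_search.py | find_asset_name_patterns
-- ===== SOURCE A (Python) =====
-- from typing import Set, Dict, List
--
-- def find_asset_name_patterns(filesystem_files: Set[str]) -> Dict[str, Set[str]]:
--     """
--     Extract asset names from filesystem paths using naming conventions.
--     Returns dict mapping asset types to sets of asset names found.
--     """
--     asset_names = {
--         'sprites': set(),
--         'sounds': set(),
--         'objects': set(),
--         'scripts': set(),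
--         'rooms': set(),
--         'fonts': set(),
--         'shaders': set()
--     }
--
--     for file_path in filesystem_files:
--         path_parts = file_path.split('/')
--
--         if len(path_parts) >= 2:
--             # Get the asset folder and name
--             folder = path_parts[0]
--             asset_name = path_parts[1]
--
--             # Map folder names to asset types
--             folder_mapping = {
--                 'sprites': 'sprites',
--                 'sounds': 'sounds',
--                 'objects': 'objects',
--                 'scripts': 'scripts',
--                 'rooms': 'rooms',
--                 'fonts': 'fonts',
--                 'shaders': 'shaders'
--             }
--
--             if folder in folder_mapping:
--                 asset_type = folder_mapping[folder]
--                 asset_names[asset_type].add(asset_name)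
--
--     return asset_names
-- ===== SOURCE B (Python) =====
-- def find_asset_name_patterns(filesystem_files):
--     """Group second path components by top-level asset folder: one scan per asset type."""
--     asset_types = ('sprites', 'sounds', 'objects', 'scripts', 'rooms', 'fonts', 'shaders')
--     return {
--         t: {parts[1]
--             for parts in (f.split('/') for f in filesystem_files)
--             if len(parts) >= 2 and parts[0] == t}
--         for t in asset_types
--     }
-- ===== Notes on version B (the rewrite author's own statement) =====
-- stated objective: alternative
-- what changed: Replaces A's single pass over files that dispatches each path through an identity folder-mapping dict into a mutable 7-key dict with a dict comprehension over the seven fixed asset types, each type scanning the file list once and collecting second path components into a set.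
import Mathlib
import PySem

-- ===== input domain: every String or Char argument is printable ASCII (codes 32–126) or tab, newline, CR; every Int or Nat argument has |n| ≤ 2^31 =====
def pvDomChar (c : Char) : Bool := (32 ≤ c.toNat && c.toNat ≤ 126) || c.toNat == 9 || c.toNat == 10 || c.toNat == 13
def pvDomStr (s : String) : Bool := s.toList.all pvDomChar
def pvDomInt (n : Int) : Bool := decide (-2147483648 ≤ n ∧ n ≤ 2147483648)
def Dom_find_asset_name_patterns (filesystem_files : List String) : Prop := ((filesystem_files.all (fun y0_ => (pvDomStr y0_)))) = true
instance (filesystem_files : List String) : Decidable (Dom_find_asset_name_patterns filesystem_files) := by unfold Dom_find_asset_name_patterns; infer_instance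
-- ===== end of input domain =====

-- B replaces A's single dispatching pass through an identity folder-mapping dict with a
-- dict comprehension over the seven fixed asset types, each scanning the files once (objective: alternative decomposition).

-- ===== PORT A =====
-- the identity folder_mapping dict A builds (a constant; hoisted, contents unchanged)
def pvFolderMapping : PySem.Dict String String :=
  (((((((PySem.Dict.empty.insert "sprites" "sprites").insert "sounds" "sounds").insert
    "objects" "objects").insert "scripts" "scripts").insert "rooms" "rooms").insert
    "fonts" "fonts").insert "shaders" "shaders")

-- the initial asset_names dict (a constant; hoisted, contents unchanged)
def pvInitAssetNames : PySem.Dict String (PySem.Set String) :=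
  (((((((PySem.Dict.empty.insert "sprites" PySem.Set.empty).insert "sounds" PySem.Set.empty).insert
    "objects" PySem.Set.empty).insert "scripts" PySem.Set.empty).insert "rooms" PySem.Set.empty).insert
    "fonts" PySem.Set.empty).insert "shaders" PySem.Set.empty)

def find_asset_name_patterns (filesystem_files : List String) : List (String × List String) :=
  let final := filesystem_files.foldl (fun d file_path =>
      -- sep "/" is nonempty, so split? is always `some`; getD [] is never the default branch
      let path_parts := (PySem.Str.split? file_path "/").getD []
      if 2 ≤ path_parts.length then
        let folder := PySem.List.pyGetD path_parts 0 ""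
        let asset_name := PySem.List.pyGetD path_parts 1 ""
        match pvFolderMapping.get? folder with
        | some asset_type => d.modify asset_type PySem.Set.empty (fun s => PySem.Set.add s asset_name)
        | none => d
      else d) pvInitAssetNames
  final.items

-- ===== PORT B =====
def pvAssetTypes : List String := ["sprites", "sounds", "objects", "scripts", "rooms", "fonts", "shaders"]

def find_asset_name_patterns_alt (filesystem_files : List String) : List (String × List String) :=
  pvAssetTypes.map (fun t =>
    (t, PySem.Set.ofList
          (((filesystem_files.map (fun f => (PySem.Str.split? f "/").getD [])).filter
              (fun parts => decide (2 ≤ parts.length) && (PySem.List.pyGetD parts 0 "" == t))).map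
            (fun parts => PySem.List.pyGetD parts 1 ""))))

-- ===== PRECONDITION & SPEC =====
def Spec_find_asset_name_patterns (filesystem_files : List String) (out : List (String × List String)) : Prop := out = find_asset_name_patterns_alt filesystem_files
instance (filesystem_files : List String) (out : List (String × List String)) : Decidable (Spec_find_asset_name_patterns filesystem_files out) := by unfold Spec_find_asset_name_patterns; infer_instance

-- ===== CLAIM (what is proved, stated in full; the proofs are below) =====
def Claim_equal_find_asset_name_patterns : Prop := ∀ (filesystem_files : List String), Dom_find_asset_name_patterns filesystem_files → Spec_find_asset_name_patterns filesystem_files (find_asset_name_patterns filesystem_files)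

-- ===== LEMMAS AND PROOFS =====

-- abbreviation for A's loop body (the zeta-reduced form of the lambda in the port)
def pvStepA (d : PySem.Dict String (PySem.Set String)) (file_path : String) : PySem.Dict String (PySem.Set String) :=
  if 2 ≤ ((PySem.Str.split? file_path "/").getD []).length then
    match pvFolderMapping.get? (PySem.List.pyGetD ((PySem.Str.split? file_path "/").getD []) 0 "") with
    | some asset_type =>
        d.modify asset_type PySem.Set.empty
          (fun s => PySem.Set.add s (PySem.List.pyGetD ((PySem.Str.split? file_path "/").getD []) 1 ""))
    | none => d
  else d

lemma pvMapping_get (folder : String) :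
    pvFolderMapping.get? folder = if folder ∈ pvAssetTypes then some folder else none := by
  simp [pvFolderMapping, PySem.Dict.get?_insert, pvAssetTypes]
  split_ifs <;> simp_all

lemma pvKeys_step (d : PySem.Dict String (PySem.Set String)) (f : String)
    (h : ∀ t ∈ pvAssetTypes, d.contains t = true) :
    (pvStepA d f).keys = d.keys := by
  unfold pvStepA
  rw [pvMapping_get]
  split_ifs with h1 h2
  · rw [PySem.Dict.keys_modify, PySem.Dict.keys_insert_of_contains _ _ (h _ h2)]
  · rfl
  · rfl

lemma pvContains_step (d : PySem.Dict String (PySem.Set String)) (f : String)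
    (h : ∀ t ∈ pvAssetTypes, d.contains t = true) :
    ∀ t ∈ pvAssetTypes, (pvStepA d f).contains t = true := by
  intro t ht
  rw [PySem.Dict.contains_iff_mem_keys, pvKeys_step d f h, ← PySem.Dict.contains_iff_mem_keys]
  exact h t ht

lemma pvKeys_fold (fs : List String) (d : PySem.Dict String (PySem.Set String))
    (h : ∀ t ∈ pvAssetTypes, d.contains t = true) :
    (fs.foldl pvStepA d).keys = d.keys ∧
      (∀ t ∈ pvAssetTypes, (fs.foldl pvStepA d).contains t = true) := by
  induction fs generalizing d with
  | nil => exact ⟨rfl, h⟩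
  | cons f fs ih =>
    obtain ⟨h1, h2⟩ := ih (pvStepA d f) (pvContains_step d f h)
    exact ⟨by rw [List.foldl_cons, h1, pvKeys_step d f h], by simpa using h2⟩

lemma pvGetD_step (d : PySem.Dict String (PySem.Set String)) (f : String) (t : String)
    (ht : t ∈ pvAssetTypes) :
    (pvStepA d f).getD t PySem.Set.empty =
      (let parts := (PySem.Str.split? f "/").getD []
       if decide (2 ≤ parts.length) && (PySem.List.pyGetD parts 0 "" == t) then
         PySem.Set.add (d.getD t PySem.Set.empty) (PySem.List.pyGetD parts 1 "")
       else d.getD t PySem.Set.empty) := by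
  unfold pvStepA
  rw [pvMapping_get]
  by_cases hlen : 2 ≤ ((PySem.Str.split? f "/").getD []).length
  · rw [if_pos hlen]
    by_cases hmem : PySem.List.pyGetD ((PySem.Str.split? f "/").getD []) 0 "" ∈ pvAssetTypes
    · rw [if_pos hmem]
      simp only [PySem.Dict.getD_modify]
      by_cases heq : PySem.List.pyGetD ((PySem.Str.split? f "/").getD []) 0 "" = t
      · simp [heq, hlen]
      · simp [Ne.symm heq, heq, hlen]
    · rw [if_neg hmem]
      have heq : (PySem.List.pyGetD ((PySem.Str.split? f "/").getD []) 0 "" == t) = false := by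
        simp only [beq_eq_false_iff_ne, ne_eq]
        intro hc; exact hmem (hc ▸ ht)
      simp [heq]
  · rw [if_neg hlen]
    simp [hlen]

lemma pvGetD_fold (fs : List String) (d : PySem.Dict String (PySem.Set String)) (t : String)
    (ht : t ∈ pvAssetTypes) :
    (fs.foldl pvStepA d).getD t PySem.Set.empty =
      PySem.Set.update (d.getD t PySem.Set.empty)
        (((fs.map (fun f => (PySem.Str.split? f "/").getD [])).filter
            (fun parts => decide (2 ≤ parts.length) && (PySem.List.pyGetD parts 0 "" == t))).map
          (fun parts => PySem.List.pyGetD parts 1 "")) := by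
  induction fs generalizing d with
  | nil => rfl
  | cons f fs ih =>
    rw [List.foldl_cons, ih (pvStepA d f), pvGetD_step d f t ht]
    simp only [List.map_cons, List.filter_cons]
    by_cases hc : (decide (2 ≤ ((PySem.Str.split? f "/").getD []).length) &&
        (PySem.List.pyGetD ((PySem.Str.split? f "/").getD []) 0 "" == t)) = true
    · simp only [hc, if_pos]
      rfl
    · simp only [Bool.not_eq_true] at hc
      simp [hc]

-- ===== VERDICT (by name: the statement is the Claim_ definition above) =====
theorem find_asset_name_patterns_spec : Claim_equal_find_asset_name_patterns := by
  intro fs _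
  unfold Spec_find_asset_name_patterns find_asset_name_patterns find_asset_name_patterns_alt
  have hstep : (fun (d : PySem.Dict String (PySem.Set String)) (file_path : String) =>
      let path_parts := (PySem.Str.split? file_path "/").getD []
      if 2 ≤ path_parts.length then
        let folder := PySem.List.pyGetD path_parts 0 ""
        let asset_name := PySem.List.pyGetD path_parts 1 ""
        match pvFolderMapping.get? folder with
        | some asset_type => d.modify asset_type PySem.Set.empty (fun s => PySem.Set.add s asset_name)
        | none => d
      else d) = pvStepA := rfl
  simp only [hstep]
  have hinit : ∀ t ∈ pvAssetTypes, pvInitAssetNames.contains t = true := by decide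
  obtain ⟨hkeys, hcont⟩ := pvKeys_fold fs pvInitAssetNames hinit
  have hnodup : (fs.foldl pvStepA pvInitAssetNames).keys.Nodup := by
    rw [hkeys]; decide
  rw [PySem.Dict.items_eq_map_keys _ hnodup PySem.Set.empty, hkeys]
  have hkeys0 : pvInitAssetNames.keys = pvAssetTypes := by decide
  rw [hkeys0]
  apply List.map_congr_left
  intro t ht
  rw [pvGetD_fold fs _ t ht]
  have h0 : pvInitAssetNames.getD t PySem.Set.empty = PySem.Set.empty := by
    fin_cases ht <;> decide
  rw [h0]
  rfl
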